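-- pv_equiv track=rewrite | github.com/HarshRathi1/AccentureCoding7 | main.py | charMoveHyphen
-- ===== SOURCE A (Python) =====
-- def charMoveHyphen(str,n):
--     a = []
--     if n<1:
--         return "null"
--     else:
--         for i in str:
--             if i == '-':
--                 a.append(i)
--         for j in str:
--             if j != '-':
--                 a.append(j)
--         s = ''
--         for i in a:
--             s += i
--     return s
-- ===== SOURCE B (Python) =====
-- def charMoveHyphen(str, n):
--     if n < 1:
--         return "null"
--     h = 0
--     rest = []
--     for c in str:
--         if c == '-':
--             h += 1
--         else:
--             rest.append(c)
--     return '-' * h + ''.join(rest)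
-- ===== Notes on version B (the rewrite author's own statement) =====
-- stated objective: simpler
-- what changed: Replaces A's two filter passes into a list plus a third string-accumulation loop with one single pass that counts hyphens and collects the non-hyphen tail, returning '-'*h + joined tail.
import Mathlib
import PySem

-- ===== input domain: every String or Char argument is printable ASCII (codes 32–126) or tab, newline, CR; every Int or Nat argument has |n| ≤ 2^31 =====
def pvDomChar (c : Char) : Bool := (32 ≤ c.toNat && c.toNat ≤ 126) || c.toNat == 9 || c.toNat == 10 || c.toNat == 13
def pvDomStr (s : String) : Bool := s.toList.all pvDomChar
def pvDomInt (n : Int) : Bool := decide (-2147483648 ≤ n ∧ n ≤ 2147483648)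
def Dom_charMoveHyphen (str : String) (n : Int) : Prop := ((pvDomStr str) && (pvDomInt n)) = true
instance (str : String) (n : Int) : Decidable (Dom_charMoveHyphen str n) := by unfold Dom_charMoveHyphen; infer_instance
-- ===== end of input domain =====

-- B (objective: simpler): one pass that counts hyphens and collects the non-hyphen tail,
-- returning '-'*h + tail, instead of A's two filter passes into a list plus a string-accumulation loop.
-- ===== PORT A =====
def charMoveHyphen (str : String) (n : Int) : String :=
  if n < 1 then "null" else
    let a : List Char := str.toList.foldl (fun a i => if i == '-' then a ++ [i] else a) []
    let a : List Char := str.toList.foldl (fun a j => if j != '-' then a ++ [j] else a) a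
    a.foldl (fun s i => s.push i) ""

-- ===== PORT B =====
def charMoveHyphen_alt (str : String) (n : Int) : String :=
  if n < 1 then "null" else
    let p : Int × List Char := str.toList.foldl
      (fun (st : Int × List Char) c =>
        if c == '-' then (st.1 + 1, st.2) else (st.1, st.2 ++ [c])) (0, [])
    String.ofList (PySem.List.pyRepeat ['-'] p.1 ++ p.2)

-- ===== PRECONDITION & SPEC =====
def Spec_charMoveHyphen (str : String) (n : Int) (out : String) : Prop := out = charMoveHyphen_alt str n
instance (str : String) (n : Int) (out : String) : Decidable (Spec_charMoveHyphen str n out) := by unfold Spec_charMoveHyphen; infer_instance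

-- ===== CLAIM (what is proved, stated in full; the proofs are below) =====
def Claim_equal_charMoveHyphen : Prop := ∀ (str : String) (n : Int), Dom_charMoveHyphen str n → Spec_charMoveHyphen str n (charMoveHyphen str n)

-- ===== LEMMAS AND PROOFS =====

-- accumulating characters onto a String one push at a time builds String.ofList
theorem pv_foldl_push (a : List Char) (s : String) :
    a.foldl (fun s i => s.push i) s = String.ofList (s.toList ++ a) := by
  induction a generalizing s with
  | nil => simp [String.ofList]
  | cons c t ih =>
    rw [List.foldl_cons, ih]
    simp [String.ofList]


-- ===== VERDICT (by name: the statement is the Claim_ definition above) =====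
theorem charMoveHyphen_spec : Claim_equal_charMoveHyphen := by
  intro str n _
  unfold Spec_charMoveHyphen charMoveHyphen charMoveHyphen_alt
  by_cases h : n < 1
  · simp [h]
  · simp only [h, if_false]
    rw [pv_foldl_push]
    rw [show (fun (st : Int × List Char) c =>
          if c == '-' then (st.1 + 1, st.2) else (st.1, st.2 ++ [c]))
        = (fun (st : Int × List Char) c =>
            ((if c == '-' then st.1 + 1 else st.1),
             (if c != '-' then st.2 ++ [c] else st.2))) from by
      funext st c; by_cases hc : c = '-' <;> simp [hc]]
    rw [PySem.List.foldl_prod_mk (fun a c => if c == '-' then a + 1 else a)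
          (fun a c => if c != '-' then a ++ [c] else a) str.toList 0 []]
    rw [PySem.List.foldl_beq_add_one, PySem.List.foldl_append_if,
        PySem.List.foldl_append_if, PySem.List.foldl_append_if,
        PySem.List.pyRepeat_singleton]
    simp [List.filter_beq]
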